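-- pv_equiv track=rewrite | github.com/michaelkimm/Algorithm-problem-solving-thought-process-re-record | Python/BaekJun/Baek2831.py | getMaxPairCnt
-- ===== SOURCE A (Python) =====
-- def getMaxPairCnt(peopleWhoWantTaller, peopleWhoWantShorter):
--     peopleWhoWantTaller.sort()
--     peopleWhoWantShorter.sort()
--
--     cnt = 0
--     p1 = 0
--     p2 = 0
--     while p1 < len(peopleWhoWantTaller) and p2 < len(peopleWhoWantShorter):
--
--         p1Height = peopleWhoWantTaller[p1]
--         p2Height = peopleWhoWantShorter[p2]
--         if p1Height < p2Height:
--             cnt += 1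
--             p1 += 1
--             p2 += 1
--         elif (p1Height == p2Height) or (p1Height > p2Height):
--             p2 += 1
--
--     return cnt
-- ===== SOURCE B (Python) =====
-- def getMaxPairCnt(peopleWhoWantTaller, peopleWhoWantShorter):
--     peopleWhoWantTaller.sort()
--     peopleWhoWantShorter.sort()
--     # one combined sorted event sequence; a shorter-wanter of height h is encoded
--     # as 2*h (processed before a taller-wanter 2*h+1 of the same height, matching
--     # the strict t < s pairing rule)
--     events = sorted([2 * h + 1 for h in peopleWhoWantTaller]
--                     + [2 * h for h in peopleWhoWantShorter])
--     cnt = 0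
--     available = 0
--     for e in events:
--         if e % 2 == 1:
--             available += 1
--         elif available > 0:
--             available -= 1
--             cnt += 1
--     return cnt
-- ===== Notes on version B (the rewrite author's own statement) =====
-- stated objective: alternative
-- what changed: Replaces the two-pointer merge over the two sorted lists by a single sweep over one combined sorted event sequence (shorter-events tagged before taller-events at equal height) that maintains an availability counter.
import Mathlib
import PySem

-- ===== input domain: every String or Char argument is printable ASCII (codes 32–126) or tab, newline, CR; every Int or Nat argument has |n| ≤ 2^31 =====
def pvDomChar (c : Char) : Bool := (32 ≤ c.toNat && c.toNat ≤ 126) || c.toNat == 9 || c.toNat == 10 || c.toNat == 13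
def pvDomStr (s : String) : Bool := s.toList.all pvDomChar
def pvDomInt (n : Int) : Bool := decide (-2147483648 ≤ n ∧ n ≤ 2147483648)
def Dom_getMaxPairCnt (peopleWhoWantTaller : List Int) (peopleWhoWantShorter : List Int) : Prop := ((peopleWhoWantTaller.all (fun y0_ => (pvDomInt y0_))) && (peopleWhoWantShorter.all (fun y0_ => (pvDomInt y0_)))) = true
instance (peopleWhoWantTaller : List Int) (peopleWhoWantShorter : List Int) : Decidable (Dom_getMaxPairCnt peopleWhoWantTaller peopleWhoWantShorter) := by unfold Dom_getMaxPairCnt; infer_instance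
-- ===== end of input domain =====

-- B replaces A's two-pointer merge by a single sweep over one combined sorted event
-- sequence with an availability counter (same O(n log n) cost; return values proved
-- equal — both A and B also sort the two argument lists in place, a side effect the
-- equivalence statement does not cover).


-- ===== PORT A =====
-- A's while loop over the two sorted lists with pointers p1, p2: the suffixes from
-- p1 and p2 are the recursion arguments; the final elif's condition is exhaustive
-- when 't < s' fails, hence the plain else branch.
def aLoop : List Int → List Int → Int
  | t :: T, s :: S =>
      if t < s then 1 + aLoop T S
      else aLoop (t :: T) S
  | _, _ => 0
termination_by T S => T.length + S.length

def getMaxPairCnt (peopleWhoWantTaller : List Int) (peopleWhoWantShorter : List Int) : Int :=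
  aLoop (PySem.List.sorted peopleWhoWantTaller (fun x => x) false)
        (PySem.List.sorted peopleWhoWantShorter (fun x => x) false)

-- ===== PORT B =====
-- one loop step of B's sweep; state = (cnt, available)
def bStep (st : Int × Int) (e : Int) : Int × Int :=
  if PySem.Int.mod e 2 == 1 then (st.1, st.2 + 1)
  else if st.2 > 0 then (st.1 + 1, st.2 - 1)
  else st

def getMaxPairCnt_alt (peopleWhoWantTaller : List Int) (peopleWhoWantShorter : List Int) : Int :=
  let _sortedTaller := PySem.List.sorted peopleWhoWantTaller (fun x => x) false
  let _sortedShorter := PySem.List.sorted peopleWhoWantShorter (fun x => x) false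
  let events := PySem.List.sorted
      (peopleWhoWantTaller.map (fun h => 2 * h + 1) ++ peopleWhoWantShorter.map (fun h => 2 * h))
      (fun x => x) false
  (events.foldl bStep (0, 0)).1

-- ===== PRECONDITION & SPEC =====
def Spec_getMaxPairCnt (peopleWhoWantTaller : List Int) (peopleWhoWantShorter : List Int) (out : Int) : Prop := out = getMaxPairCnt_alt peopleWhoWantTaller peopleWhoWantShorter
instance (peopleWhoWantTaller : List Int) (peopleWhoWantShorter : List Int) (out : Int) : Decidable (Spec_getMaxPairCnt peopleWhoWantTaller peopleWhoWantShorter out) := by unfold Spec_getMaxPairCnt; infer_instance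

-- ===== CLAIM (what is proved, stated in full; the proofs are below) =====
def Claim_equal_getMaxPairCnt : Prop := ∀ (peopleWhoWantTaller : List Int) (peopleWhoWantShorter : List Int), Dom_getMaxPairCnt peopleWhoWantTaller peopleWhoWantShorter → Spec_getMaxPairCnt peopleWhoWantTaller peopleWhoWantShorter (getMaxPairCnt peopleWhoWantTaller peopleWhoWantShorter)

-- ===== LEMMAS AND PROOFS =====

-- the merge of the two sorted height lists into B's encoded event sequence
def mergeEv : List Int → List Int → List Int
  | t :: T, s :: S =>
      if t < s then (2 * t + 1) :: mergeEv T (s :: S)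
      else (2 * s) :: mergeEv (t :: T) S
  | [], S => S.map (fun h => 2 * h)
  | T, [] => T.map (fun h => 2 * h + 1)
termination_by T S => T.length + S.length

-- B's sweep, read off the merge structure; a = available
def sweep : Nat → List Int → List Int → Int
  | a, t :: T, s :: S =>
      if t < s then sweep (a + 1) T (s :: S)
      else if a > 0 then 1 + sweep (a - 1) (t :: T) S
      else sweep a (t :: T) S
  | a, [], _ :: S => if a > 0 then 1 + sweep (a - 1) [] S else 0
  | _, _, [] => 0
termination_by a T S => T.length + S.length

theorem aLoop_cons (t s : Int) (T S : List Int) :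
    aLoop (t :: T) (s :: S) = if t < s then 1 + aLoop T S else aLoop (t :: T) S := by
  rw [aLoop]

theorem aLoop_nil_right : ∀ (T : List Int), aLoop T [] = 0 := fun T => by
  cases T <;> simp [aLoop.eq_def]

theorem aLoop_nil_left : ∀ (S : List Int), aLoop [] S = 0 := fun S => by
  cases S <;> simp [aLoop.eq_def]

theorem sweep_nil_right : ∀ (a : Nat) (T : List Int), sweep a T [] = 0 := fun _ T => by
  cases T <;> simp [sweep.eq_def]

theorem sweep_nil_left : ∀ (S : List Int) (a : Nat), sweep a [] S = ((min a S.length : Nat) : Int) := by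
  intro S
  induction S with
  | nil => intro a; simp [sweep_nil_right]
  | cons s S ih =>
      intro a
      rw [sweep]
      by_cases ha : 0 < a
      · rw [if_pos ha, ih (a - 1)]
        have : min a (s :: S).length = min (a - 1) S.length + 1 := by simp; omega
        rw [this]; push_cast; ring
      · rw [if_neg ha]
        have h0 : a = 0 := by omega
        simp [h0]

theorem sweep_zero_nil (S : List Int) : sweep 0 [] S = 0 := by
  rw [sweep_nil_left]; simp

theorem mergeEv_perm : ∀ (T S : List Int),
    (mergeEv T S).Perm (T.map (fun h => 2 * h + 1) ++ S.map (fun h => 2 * h))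
  | t :: T, s :: S => by
      rw [mergeEv]
      split
      · exact List.Perm.cons _ (mergeEv_perm T (s :: S))
      · rw [show (s :: S).map (fun h => 2 * h) = 2 * s :: S.map (fun h => 2 * h) from rfl]
        exact ((mergeEv_perm (t :: T) S).cons (2 * s)).trans List.perm_middle.symm
  | [], S => by rw [mergeEv]; simp
  | t :: T, [] => by
      rw [mergeEv]
      · simp
      · simp
termination_by T S => T.length + S.length

theorem mem_mergeEv {x : Int} {T S : List Int} (h : x ∈ mergeEv T S) :
    (∃ t ∈ T, x = 2 * t + 1) ∨ ∃ s ∈ S, x = 2 * s := by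
  have := (mergeEv_perm T S).mem_iff.mp h
  simp only [List.mem_append, List.mem_map] at this
  rcases this with ⟨t, ht, rfl⟩ | ⟨s, hs, rfl⟩
  · exact Or.inl ⟨t, ht, rfl⟩
  · exact Or.inr ⟨s, hs, rfl⟩

theorem mergeEv_pairwise : ∀ (T S : List Int),
    T.Pairwise (· ≤ ·) → S.Pairwise (· ≤ ·) → (mergeEv T S).Pairwise (· ≤ ·)
  | t :: T, s :: S, hT, hS => by
      rw [List.pairwise_cons] at hT hS
      rw [mergeEv]
      split
      · rename_i hts
        refine List.pairwise_cons.mpr ⟨?_, mergeEv_pairwise T (s :: S) hT.2 (List.pairwise_cons.mpr hS)⟩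
        intro x hx
        rcases mem_mergeEv hx with ⟨t', ht', rfl⟩ | ⟨s', hs', rfl⟩
        · have := hT.1 t' ht'; omega
        · rcases List.mem_cons.mp hs' with rfl | h
          · omega
          · have := hS.1 s' h; omega
      · rename_i hts
        refine List.pairwise_cons.mpr ⟨?_, mergeEv_pairwise (t :: T) S (List.pairwise_cons.mpr hT) hS.2⟩
        intro x hx
        rcases mem_mergeEv hx with ⟨t', ht', rfl⟩ | ⟨s', hs', rfl⟩
        · rcases List.mem_cons.mp ht' with rfl | h
          · omega
          · have := hT.1 t' h; omega
        · have := hS.1 s' hs'; omega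
  | [], S, _, hS => by
      rw [mergeEv]; exact List.Pairwise.map _ (fun a b h => by omega) hS
  | t :: T, [], hT, _ => by
      rw [mergeEv]
      · exact List.Pairwise.map _ (fun a b h => by omega) hT
      · simp
termination_by T S => T.length + S.length

theorem bStep_odd (st : Int × Int) (h : Int) : bStep st (2 * h + 1) = (st.1, st.2 + 1) := by
  simp [bStep]

theorem bStep_even (st : Int × Int) (h : Int) :
    bStep st (2 * h) = if st.2 > 0 then (st.1 + 1, st.2 - 1) else st := by
  simp [bStep]

theorem fold_map_odd : ∀ (T : List Int) (c x : Int),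
    ((T.map (fun h => 2 * h + 1)).foldl bStep (c, x)).1 = c
  | [], _, _ => rfl
  | t :: T, c, x => by
      rw [List.map_cons, List.foldl_cons, bStep_odd]
      exact fold_map_odd T c (x + 1)

theorem fold_map_even : ∀ (S : List Int) (c : Int) (a : Nat),
    ((S.map (fun h => 2 * h)).foldl bStep (c, (a : Int))).1 = c + sweep a [] S
  | [], c, a => by simp [sweep_nil_right]
  | s :: S, c, a => by
      rw [List.map_cons, List.foldl_cons, bStep_even]
      by_cases ha : 0 < a
      · rw [if_pos (by exact_mod_cast ha : ((a : Int)) > 0), sweep, if_pos ha]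
        rw [show ((a : Int) - 1) = ((a - 1 : Nat) : Int) by omega, fold_map_even S (c + 1) (a - 1)]
        ring
      · have h0 : a = 0 := by omega
        subst h0
        rw [if_neg (by norm_num), fold_map_even S c 0, sweep_zero_nil, sweep]
        norm_num

theorem fold_mergeEv : ∀ (T S : List Int) (c : Int) (a : Nat),
    ((mergeEv T S).foldl bStep (c, (a : Int))).1 = c + sweep a T S
  | t :: T, s :: S, c, a => by
      rw [mergeEv, sweep]
      split
      · rw [List.foldl_cons, bStep_odd]
        have h := fold_mergeEv T (s :: S) c (a + 1)
        rw [show ((a : Int) + 1) = ((a + 1 : Nat) : Int) by omega, h]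
      · rw [List.foldl_cons, bStep_even]
        by_cases ha : 0 < a
        · rw [if_pos (by exact_mod_cast ha : ((a : Int)) > 0), if_pos ha]
          rw [show ((a : Int) - 1) = ((a - 1 : Nat) : Int) by omega, fold_mergeEv (t :: T) S (c + 1) (a - 1)]
          ring
        · have h0 : a = 0 := by omega
          subst h0
          rw [if_neg (by norm_num), if_neg (by norm_num), fold_mergeEv (t :: T) S c 0]
  | [], S, c, a => by rw [mergeEv, fold_map_even]
  | t :: T, [], c, _a => by
      rw [mergeEv]
      · rw [fold_map_odd, sweep_nil_right]; ring
      · simp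
termination_by T S c a => T.length + S.length

theorem lemmaM : ∀ (X Y : List Int) (a : Nat), Y.Pairwise (· ≤ ·) →
    sweep a X Y = ((min a Y.length : Nat) : Int) + aLoop X (Y.drop a)
  | [], Y, a, _ => by
      rw [sweep_nil_left, aLoop_nil_left]; ring
  | _ :: _, [], _a, _ => by
      simp [sweep_nil_right, aLoop_nil_right]
  | t :: T, s :: S, a, hY => by
      rw [List.pairwise_cons] at hY
      rw [sweep]
      split
      · rename_i hts
        rw [lemmaM T (s :: S) (a + 1) (List.pairwise_cons.mpr hY)]
        by_cases hle : a ≤ S.length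
        · by_cases ha : a = 0
          · subst ha
            have hd1 : (s :: S).drop (0 + 1) = S := by simp
            have hd0 : (s :: S).drop 0 = s :: S := rfl
            rw [hd1, hd0, aLoop_cons, if_pos hts]
            have h1 : min (0 + 1) (s :: S).length = 1 := by simp
            have h2 : min 0 (s :: S).length = 0 := by simp
            rw [h1, h2]
            push_cast
            ring
          · have ha' : 0 < a := Nat.pos_of_ne_zero ha
            have hlt : a - 1 < S.length := by omega
            have hdropS : S.drop (a - 1) = S[a - 1] :: S.drop a := by
              rw [List.drop_eq_getElem_cons hlt, show a - 1 + 1 = a by omega]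
            have hdrop1 : (s :: S).drop a = S.drop (a - 1) := by
              conv_lhs => rw [show a = (a - 1) + 1 by omega]
              simp
            have hdrop2 : (s :: S).drop (a + 1) = S.drop a := by simp
            rw [hdrop1, hdrop2, hdropS, aLoop_cons]
            have hs' : s ≤ S[a - 1] := hY.1 _ (List.getElem_mem hlt)
            rw [if_pos (by omega : t < S[a - 1])]
            have h1 : min (a + 1) (s :: S).length = a + 1 := by simp; omega
            have h2 : min a (s :: S).length = a := by simp; omega
            rw [h1, h2]; push_cast; ring
        · have h1 : min (a + 1) (s :: S).length = S.length + 1 := by simp; omega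
          have h2 : min a (s :: S).length = S.length + 1 := by simp; omega
          have h3 : (s :: S).drop (a + 1) = [] := by apply List.drop_eq_nil_of_le; simp; omega
          have h4 : (s :: S).drop a = [] := by apply List.drop_eq_nil_of_le; simp; omega
          rw [h1, h2, h3, h4, aLoop_nil_right, aLoop_nil_right]
      · rename_i hts
        by_cases ha : 0 < a
        · rw [if_pos ha, lemmaM (t :: T) S (a - 1) hY.2]
          have hdrop : (s :: S).drop a = S.drop (a - 1) := by
            conv_lhs => rw [show a = (a - 1) + 1 by omega]
            simp
          rw [hdrop]
          have : min a (s :: S).length = min (a - 1) S.length + 1 := by simp; omega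
          rw [this]; push_cast; ring
        · rw [if_neg ha]
          have h0 : a = 0 := by omega
          subst h0
          rw [lemmaM (t :: T) S 0 hY.2]
          simp only [List.drop_zero]
          rw [aLoop_cons, if_neg hts]
          simp
  termination_by X Y a => X.length + Y.length

-- ===== VERDICT (by name: the statement is the Claim_ definition above) =====
theorem getMaxPairCnt_spec : Claim_equal_getMaxPairCnt := by
  intro T S _
  unfold Spec_getMaxPairCnt getMaxPairCnt getMaxPairCnt_alt
  dsimp only
  set T' := PySem.List.sorted T (fun x => x) false with hT'
  set S' := PySem.List.sorted S (fun x => x) false with hS'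
  have hTp : T'.Pairwise (· ≤ ·) := PySem.List.sorted_pairwise T (fun x => x)
  have hSp : S'.Pairwise (· ≤ ·) := PySem.List.sorted_pairwise S (fun x => x)
  have hperm : (mergeEv T' S').Perm (T.map (fun h => 2 * h + 1) ++ S.map (fun h => 2 * h)) := by
    refine (mergeEv_perm T' S').trans (List.Perm.append ?_ ?_)
    · exact (PySem.List.sorted_perm T (fun x => x) false).map _
    · exact (PySem.List.sorted_perm S (fun x => x) false).map _
  have hev : PySem.List.sorted
      (T.map (fun h => 2 * h + 1) ++ S.map (fun h => 2 * h)) (fun x => x) false = mergeEv T' S' :=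
    PySem.List.sorted_id_eq_of_perm_of_pairwise _ _ hperm (mergeEv_pairwise T' S' hTp hSp)
  rw [hev]
  have hfold := fold_mergeEv T' S' 0 0
  rw [show ((0 : Nat) : Int) = (0 : Int) from rfl] at hfold
  rw [hfold, lemmaM T' S' 0 hSp]
  simp
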